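-- pv_equiv track=rewrite | github.com/Sawe22/pdfMetaDataExtractor | pdf_file_processing.py | segment_document
-- ===== SOURCE A (Python) =====
-- def segment_document(document_text):
--     sections = {
--         "Abstract": "",
--         "Introduction": "",
--         "Methodology": "",
--         "Results": "",
--         "Conclusion": ""
--     }
--
--     current_section = None
--     for line in document_text.split('\n'):
--         for section in sections:
--             if section.lower() in line.lower():
--                 current_section = section
--                 break
--         if current_section:
--             sections[current_section] += line + '\n'
--
--     return sections
-- ===== SOURCE B (Python) =====
-- def segment_document(document_text):
--     keywords = ["Abstract", "Introduction", "Methodology", "Results", "Conclusion"]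
--     lowered = [(k, k.lower()) for k in keywords]
--
--     def heading(line):
--         low = line.lower()
--         for k, kl in lowered:
--             if kl in low:
--                 return k
--         return None
--
--     result = dict.fromkeys(keywords, "")
--     lines = document_text.split('\n')
--     n = len(lines)
--     i = 0
--     # skip lines before the first heading
--     while i < n and heading(lines[i]) is None:
--         i += 1
--     # each chunk runs from a heading line up to (excluding) the next heading line
--     while i < n:
--         k = heading(lines[i])
--         j = i + 1
--         while j < n and heading(lines[j]) is None:
--             j += 1
--         result[k] += "".join(line + "\n" for line in lines[i:j])
--         i = j
--     return result
-- ===== Notes on version B (the rewrite author's own statement) =====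
-- stated objective: alternative
-- what changed: A's single pass with a sticky current-section state and one dict string-append per line is replaced by a skip-preamble + chunking decomposition: lower-cased keywords are precomputed once, lines before the first heading are skipped, then each contiguous chunk (heading line up to the next heading) is joined and added to its section with one dict update per chunk.
import Mathlib
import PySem

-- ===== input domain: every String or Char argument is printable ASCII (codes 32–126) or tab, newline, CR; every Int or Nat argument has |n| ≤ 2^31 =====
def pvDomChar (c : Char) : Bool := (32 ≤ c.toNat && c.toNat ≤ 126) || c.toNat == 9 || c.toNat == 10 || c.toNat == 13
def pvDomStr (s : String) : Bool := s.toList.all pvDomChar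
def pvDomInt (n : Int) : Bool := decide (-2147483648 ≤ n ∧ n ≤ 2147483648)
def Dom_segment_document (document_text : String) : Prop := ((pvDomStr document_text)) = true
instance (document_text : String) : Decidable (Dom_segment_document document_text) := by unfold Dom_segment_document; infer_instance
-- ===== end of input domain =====

-- B re-decomposes A's single sticky-state line fold into skip-preamble + contiguous-chunk
-- processing (one dict update per chunk instead of per line); same return value.

-- ===== PORT A =====
-- the fixed key list of A's `sections` dict (its keys never change, so `for section in sections`
-- iterates exactly this list, in insertion order)
def segKeys : List String := ["Abstract", "Introduction", "Methodology", "Results", "Conclusion"]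

-- A's inner `for section in sections: if section.lower() in line.lower(): …; break`
def aFindSection (line : String) : Option String :=
  segKeys.find? (fun s => PySem.Str.isIn (PySem.Str.lower s) (PySem.Str.lower line))

-- one iteration of A's outer `for line in document_text.split('\n')` body
-- (`if current_section:` — every key is a non-empty string, so truthiness = is not None)
def aStep (st : Option String × PySem.Dict String String) (line : String) :
    Option String × PySem.Dict String String :=
  let cur : Option String :=
    match aFindSection line with
    | some s => some s
    | none => st.1
  match cur with
  | some k => (some k, st.2.modify k "" (fun v => v ++ (line ++ "\n")))
  | none => (none, st.2)

def initSections : PySem.Dict String String :=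
  PySem.Dict.mk [("Abstract", ""), ("Introduction", ""), ("Methodology", ""), ("Results", ""), ("Conclusion", "")]

def segment_document (document_text : String) : List (String × String) :=
  (((PySem.Str.split? document_text "\n").getD []).foldl aStep (none, initSections)).2.items

-- ===== PORT B =====
-- Source B's `lowered = [(k, k.lower()) for k in keywords]`
def bLowered : List (String × String) := segKeys.map (fun k => (k, PySem.Str.lower k))

-- Source B's `heading(line)`
def bHeading (line : String) : Option String :=
  let low := PySem.Str.lower line
  (bLowered.find? (fun p => PySem.Str.isIn p.2 low)).map Prod.fst

-- Source B's `"".join(line + "\n" for line in lines[i:j])`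
def bJoin (ls : List String) : String := PySem.Str.join "" (ls.map (fun l => l ++ "\n"))

-- Source B's `dict.fromkeys(keywords, "")`
def bInit : PySem.Dict String String := PySem.Dict.mk (segKeys.map (fun k => (k, "")))

-- Source B's outer `while i < n:` loop; the inner `while j < n and heading(lines[j]) is None`
-- scan is the takeWhile/dropWhile split of the remaining lines (index i ↔ the suffix of lines)
def bChunks : List String → PySem.Dict String String → PySem.Dict String String
  | [], d => d
  | l :: ls, d =>
    match bHeading l with
    | none => d   -- unreachable: bChunks is only entered at a heading line
    | some k =>
      bChunks (ls.dropWhile (fun x => (bHeading x).isNone))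
        (d.modify k "" (fun v => v ++ bJoin (l :: ls.takeWhile (fun x => (bHeading x).isNone))))
termination_by ls _ => ls.length
decreasing_by simpa using Nat.lt_succ_of_le (List.length_dropWhile_le _ _)

def segment_document_alt (document_text : String) : List (String × String) :=
  let lines := (PySem.Str.split? document_text "\n").getD []
  (bChunks (lines.dropWhile (fun l => (bHeading l).isNone)) bInit).items

-- ===== PRECONDITION & SPEC =====
def Spec_segment_document (document_text : String) (out : List (String × String)) : Prop := out = segment_document_alt document_text
instance (document_text : String) (out : List (String × String)) : Decidable (Spec_segment_document document_text out) := by unfold Spec_segment_document; infer_instance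

-- ===== CLAIM (what is proved, stated in full; the proofs are below) =====
def Claim_equal_segment_document : Prop := ∀ (document_text : String), Dom_segment_document document_text → Spec_segment_document document_text (segment_document document_text)

-- ===== LEMMAS AND PROOFS =====

-- the two heading scanners agree (B only precomputes the lowered keywords)
theorem find?_map_pair_fst (f q : String → String → Bool) (line : String) (ks : List String)
    (hfq : ∀ k, f (PySem.Str.lower k) line = q k line) :
    (((ks.map (fun k => (k, PySem.Str.lower k))).find? (fun p => f p.2 line)).map Prod.fst)
      = ks.find? (fun k => q k line) := by
  induction ks with
  | nil => rfl
  | cons a t ih =>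
    rw [List.map_cons, List.find?_cons, List.find?_cons]
    simp only [hfq]
    cases q a line
    · simpa using ih
    · rfl

theorem bHeading_eq (line : String) : bHeading line = aFindSection line := by
  simpa [bHeading, bLowered, aFindSection] using
    find?_map_pair_fst (fun s l => PySem.Str.isIn s (PySem.Str.lower l))
      (fun k l => PySem.Str.isIn (PySem.Str.lower k) (PySem.Str.lower l)) line segKeys
      (fun k => rfl)

-- two successive appends into the same key are one append (Python's `+=` twice)
theorem modify_append_modify_append (d : PySem.Dict String String) (k a b : String) :
    (d.modify k "" (fun v => v ++ a)).modify k "" (fun v => v ++ b)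
      = d.modify k "" (fun v => v ++ (a ++ b)) := by
  simp only [PySem.Dict.modify, PySem.Dict.getD_insert_self, PySem.Dict.insert_insert_self,
    String.append_assoc]

theorem string_eq_of_toList (a b : String) (h : a.toList = b.toList) : a = b := by
  have := congrArg String.ofList h
  simpa [String.ofList_toList] using this

theorem charsJoin_nil_cons (c : List Char) (rest : List (List Char)) :
    PySem.Chars.join [] (c :: rest) = c ++ PySem.Chars.join [] rest := by
  cases rest <;>
    simp [PySem.Chars.join_nil, PySem.Chars.join_singleton, PySem.Chars.join_cons_cons]

theorem bJoin_nil : bJoin [] = "" := by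
  apply string_eq_of_toList
  simp [bJoin, PySem.Str.toList_join, PySem.Chars.join_nil]

theorem bJoin_cons (l : String) (ls : List String) :
    bJoin (l :: ls) = (l ++ "\n") ++ bJoin ls := by
  apply string_eq_of_toList
  simp [bJoin, PySem.Str.toList_join, String.toList_append, charsJoin_nil_cons]

-- chunk lemma: with current section k and a pending accumulated string acc appended to k,
-- A's per-line fold equals B's chunked processing
theorem chunk_eq (ls : List String) (k : String) (d : PySem.Dict String String) (acc : String) :
    (ls.foldl aStep (some k, d.modify k "" (fun v => v ++ acc))).2
      = bChunks (ls.dropWhile (fun x => (bHeading x).isNone))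
          (d.modify k "" (fun v => v ++ (acc ++ bJoin (ls.takeWhile (fun x => (bHeading x).isNone))))) := by
  induction ls generalizing k d acc with
  | nil =>
    simp [bChunks, bJoin_nil, String.append_empty]
  | cons l ls ih =>
    cases h : aFindSection l with
    | none =>
      have hb : bHeading l = none := by rw [bHeading_eq, h]
      have hstep : ∀ d' : PySem.Dict String String,
          aStep (some k, d') l = (some k, d'.modify k "" (fun v => v ++ (l ++ "\n"))) := by
        intro d'; simp [aStep, h]
      simp only [List.foldl_cons, hstep, modify_append_modify_append]
      rw [ih k d (acc ++ (l ++ "\n"))]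
      simp [hb, bJoin_cons, String.append_assoc]
    | some k' =>
      have hb : bHeading l = some k' := by rw [bHeading_eq, h]
      have hstep : ∀ d' : PySem.Dict String String,
          aStep (some k, d') l = (some k', d'.modify k' "" (fun v => v ++ (l ++ "\n"))) := by
        intro d'; simp [aStep, h]
      simp only [List.foldl_cons, hstep]
      rw [ih k' (d.modify k "" (fun v => v ++ acc)) (l ++ "\n")]
      have hdw : (l :: ls).dropWhile (fun x => (bHeading x).isNone) = l :: ls := by
        simp [hb]
      have htw : (l :: ls).takeWhile (fun x => (bHeading x).isNone) = [] := by
        simp [hb]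
      rw [hdw, htw]
      conv_rhs => rw [bChunks]
      simp [hb, bJoin_nil, String.append_empty, bJoin_cons, String.append_assoc]

-- skip lemma: with no current section yet, A skips exactly the lines B's preamble drop skips
theorem skip_eq (ls : List String) (d : PySem.Dict String String) :
    (ls.foldl aStep (none, d)).2
      = bChunks (ls.dropWhile (fun l => (bHeading l).isNone)) d := by
  induction ls generalizing d with
  | nil => simp [bChunks]
  | cons l ls ih =>
    cases h : aFindSection l with
    | none =>
      have hb : bHeading l = none := by rw [bHeading_eq, h]
      have hstep : aStep (none, d) l = (none, d) := by simp [aStep, h]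
      simp only [List.foldl_cons, hstep]
      rw [ih d]
      simp [hb]
    | some k =>
      have hb : bHeading l = some k := by rw [bHeading_eq, h]
      have hstep : aStep (none, d) l = (some k, d.modify k "" (fun v => v ++ (l ++ "\n"))) := by
        simp [aStep, h]
      simp only [List.foldl_cons, hstep]
      rw [chunk_eq ls k d (l ++ "\n")]
      have hdw : (l :: ls).dropWhile (fun x => (bHeading x).isNone) = l :: ls := by
        simp [hb]
      rw [hdw]
      conv_rhs => rw [bChunks]
      simp [hb, bJoin_cons]

-- ===== VERDICT (by name: the statement is the Claim_ definition above) =====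
theorem segment_document_spec : Claim_equal_segment_document := by
  intro t _
  unfold Spec_segment_document segment_document segment_document_alt
  have hinit : bInit = initSections := by rfl
  rw [hinit, skip_eq]
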